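-- pv_equiv track=rewrite | github.com/omakrgupta123-droid/edme_drona | s3check.py | normalize_label_text
-- ===== SOURCE A (Python) =====
-- def normalize_label_text(value: str) -> str:
--     if value is None:
--         return ""
--     text = str(value).lower()
--     cleaned = []
--     for ch in text:
--         if ch.isalnum():
--             cleaned.append(ch)
--         else:
--             cleaned.append(" ")
--     return " ".join("".join(cleaned).split())
-- ===== SOURCE B (Python) =====
-- def normalize_label_text(value: str) -> str:
--     if value is None:
--         return ""
--     words = []
--     buf = []
--     for ch in str(value).lower():
--         if ch.isalnum():
--             buf.append(ch)
--         elif buf: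
--             words.append("".join(buf))
--             buf = []
--     if buf:
--         words.append("".join(buf))
--     return " ".join(words)
-- ===== Notes on version B (the rewrite author's own statement) =====
-- stated objective: alternative
-- what changed: B tokenizes in one pass with a word buffer flushed at non-alnum boundaries instead of replacing non-alnum chars with spaces and then split/join.
import Mathlib
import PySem

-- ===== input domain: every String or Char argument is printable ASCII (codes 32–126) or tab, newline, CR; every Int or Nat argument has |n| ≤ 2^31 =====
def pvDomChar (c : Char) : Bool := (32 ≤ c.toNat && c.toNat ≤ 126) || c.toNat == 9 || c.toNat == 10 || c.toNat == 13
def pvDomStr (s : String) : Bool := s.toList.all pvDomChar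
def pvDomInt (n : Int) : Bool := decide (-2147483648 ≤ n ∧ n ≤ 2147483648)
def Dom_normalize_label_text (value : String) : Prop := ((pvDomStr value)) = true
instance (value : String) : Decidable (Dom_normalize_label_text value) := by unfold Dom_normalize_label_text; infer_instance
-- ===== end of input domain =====

-- B builds the alphanumeric words directly in one pass (buffer flushed at non-alnum
-- boundaries) instead of A's replace-with-space then split/join; same cost, different shape.
-- (A's `value is None` branch is unrepresentable for a Lean String argument and is dropped.)

-- ===== PORT A =====
def normalize_label_text (value : String) : String :=
  String.ofList (PySem.Chars.join [' '] (PySem.Chars.split₀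
    ((PySem.Chars.lower value.toList).foldl (fun acc ch =>
      acc ++ [if PySem.Chars.isalnum ch then ch else ' ']) [])))

-- ===== PORT B =====
-- the tokenizing loop of Source B: buf collects the current word, words the finished ones
def nltTok : List Char → List Char → List (List Char) → List (List Char)
  | [], buf, words => if buf.isEmpty then words else words ++ [buf]
  | c :: rest, buf, words =>
      if PySem.Chars.isalnum c then nltTok rest (buf ++ [c]) words
      else if buf.isEmpty then nltTok rest buf words
      else nltTok rest [] (words ++ [buf])

def normalize_label_text_alt (value : String) : String :=
  String.ofList (PySem.Chars.join [' '] (nltTok (PySem.Chars.lower value.toList) [] []))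

-- ===== PRECONDITION & SPEC =====
def Spec_normalize_label_text (value : String) (out : String) : Prop := out = normalize_label_text_alt value
instance (value : String) (out : String) : Decidable (Spec_normalize_label_text value out) := by unfold Spec_normalize_label_text; infer_instance

-- ===== CLAIM (what is proved, stated in full; the proofs are below) =====
def Claim_equal_normalize_label_text : Prop := ∀ (value : String), Dom_normalize_label_text value → Spec_normalize_label_text value (normalize_label_text value)

-- ===== LEMMAS AND PROOFS =====

-- an alphanumeric character is never whitespace
theorem nlt_alnum_not_space (c : Char) (h : PySem.Chars.isalnum c = true) :
    PySem.Chars.isspace c = false := by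
  have h32 : c.toNat = c.val.toNat := rfl
  simp only [PySem.Chars.isalnum, PySem.Chars.isalpha, PySem.Chars.isdigit,
    PySem.Chars.isupper, PySem.Chars.islower, PySem.Chars.isspace, Char.le_def,
    UInt32.le_iff_toNat_le, Bool.or_eq_true, Bool.and_eq_true,
    decide_eq_true_eq, Bool.or_eq_false_iff, Bool.and_eq_false_iff,
    decide_eq_false_iff_not, not_le, h32] at *
  have a1 : ('A').val.toNat = 65 := rfl
  have a2 : ('Z').val.toNat = 90 := rfl
  have a3 : ('a').val.toNat = 97 := rfl
  have a4 : ('z').val.toNat = 122 := rfl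
  have a5 : ('0').val.toNat = 48 := rfl
  have a6 : ('9').val.toNat = 57 := rfl
  omega

-- split₀ of the space-replaced list computes exactly B's tokenizing loop
theorem nlt_go_eq (cs : List Char) : ∀ (buf : List Char) (words : List (List Char)),
    PySem.Chars.split₀.go
      (cs.map (fun ch => if PySem.Chars.isalnum ch then ch else ' '))
      buf.reverse words.reverse
      = nltTok cs buf words := by
  induction cs with
  | nil =>
    intro buf words
    by_cases hb : buf = [] <;> simp [PySem.Chars.split₀.go, nltTok, hb]
  | cons c rest ih =>
    intro buf words
    by_cases hc : PySem.Chars.isalnum c = true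
    · simpa [PySem.Chars.split₀.go, hc, nlt_alnum_not_space c hc, nltTok]
        using ih (buf ++ [c]) words
    · by_cases hb : buf = []
      · simpa [PySem.Chars.split₀.go, hc, hb, nltTok] using ih [] words
      · have : buf.reverse.isEmpty = false := by simp [hb]
        simpa [PySem.Chars.split₀.go, hc, hb, this, nltTok] using ih [] (words ++ [buf])

-- nlt_go_eq instantiated at the empty starting state
theorem nlt_go_eq_nil (cs : List Char) :
    PySem.Chars.split₀.go
      (cs.map (fun ch => if PySem.Chars.isalnum ch then ch else ' ')) [] []
      = nltTok cs [] [] :=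
  nlt_go_eq cs [] []

-- ===== VERDICT (by name: the statement is the Claim_ definition above) =====
theorem normalize_label_text_spec : Claim_equal_normalize_label_text := by
  intro value _
  unfold Spec_normalize_label_text normalize_label_text normalize_label_text_alt
  rw [PySem.List.foldl_append_singleton_eq_map, PySem.Chars.split₀]
  rw [List.nil_append, nlt_go_eq_nil]
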